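-- pv_equiv track=rewrite | github.com/xiayana/tes8lab | multilang/resources/sysaudit/alg/core_alg.py | calcMaxProbWin
-- ===== SOURCE A (Python) =====
-- def calcMaxProbWin(wins):
--     #判定是否是高重复窗口，根据信息熵思路，当其中某一占比>0.9时，信息熵较低
--     #返回符合条件的最高概率key
--     d=dict()
--     l=float(len(wins))
--     for item in wins:
--         d.setdefault(item, 0)
--         d[item] += 1
--     mprob=0
--     index=None
--     for k in d:
--         d[k]/=l
--         if d[k]>mprob:
--             mprob=d[k]
--             index=k
--     if mprob>=0.9:
--         return index
-- ===== SOURCE B (Python) =====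
-- def calcMaxProbWin(wins):
--     # Boyer-Moore majority vote with O(1) extra state, then one verification pass;
--     # exact integer comparison 10*occ >= 9*n replaces the float ratio test.
--     if not wins:
--         return None
--     cand, cnt = None, 0
--     for x in wins:
--         if cnt == 0:
--             cand, cnt = x, 1
--         elif x == cand:
--             cnt += 1
--         else:
--             cnt -= 1
--     if 10 * wins.count(cand) >= 9 * len(wins):
--         return cand
--     return None
-- ===== Notes on version B (the rewrite author's own statement) =====
-- stated objective: alternative
-- what changed: Replaces the frequency dictionary plus argmax scan with a Boyer-Moore majority vote keeping O(1) extra state (candidate,count), followed by one verification count and an exact integer threshold test 10*occ >= 9*n instead of float division; no dict allocation/hashing gives a constant-factor speedup.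
import Mathlib
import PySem

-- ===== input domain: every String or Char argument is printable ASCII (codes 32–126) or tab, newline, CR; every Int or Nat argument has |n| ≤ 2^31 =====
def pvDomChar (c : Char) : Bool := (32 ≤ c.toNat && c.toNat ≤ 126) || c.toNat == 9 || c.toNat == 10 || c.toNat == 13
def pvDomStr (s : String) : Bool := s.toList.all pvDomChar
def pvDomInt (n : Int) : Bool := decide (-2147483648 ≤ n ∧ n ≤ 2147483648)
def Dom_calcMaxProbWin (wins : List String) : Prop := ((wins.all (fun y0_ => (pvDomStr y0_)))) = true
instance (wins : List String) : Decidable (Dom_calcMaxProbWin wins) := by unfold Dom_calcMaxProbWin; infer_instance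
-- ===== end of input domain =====

-- B replaces A's frequency dict + argmax scan by a Boyer-Moore majority vote with O(1)
-- extra state and an exact integer threshold test (objective: alternative algorithm).

-- ===== PORT A =====
-- Python floats are modelled by ℚ: every probability here is count/len with len ≤ the list
-- length, and such ratios are never within one double ulp of the literal 0.9 except when
-- exactly equal, so every comparison A makes has the same outcome over ℚ as over doubles.
-- (A's in-place store d[k] /= l is dead after the loop; only the read value count is used.)
def calcMaxProbWin (wins : List String) : Option String :=
  let d := wins.foldl (fun d item =>
      let d1 := d.setdefault item 0      -- d.setdefault(item, 0)
      d1.insert item (d1.getD item 0 + 1)) (PySem.Dict.empty : PySem.Dict String Int)  -- d[item] += 1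
  let l : ℚ := ((wins.length : Int) : ℚ)
  let r := d.keys.foldl (fun (s : ℚ × Option String) k =>
      let p := ((d.getD k 0 : Int) : ℚ) / l      -- d[k] /= l  (the value then compared)
      if p > s.1 then (p, some k) else s) ((0 : ℚ), (none : Option String))
  if r.1 ≥ (9 : ℚ) / 10 then r.2 else none

-- ===== PORT B =====
def calcMaxProbWin_alt (wins : List String) : Option String :=
  if wins.isEmpty then none
  else
    let s := wins.foldl (fun (s : String × Int) x =>
        if s.2 = 0 then (x, 1)
        else if x = s.1 then (s.1, s.2 + 1)
        else (s.1, s.2 - 1)) ("", 0)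
    if 10 * (wins.count s.1 : Int) ≥ 9 * (wins.length : Int) then some s.1 else none

-- ===== PRECONDITION & SPEC =====
def Spec_calcMaxProbWin (wins : List String) (out : Option String) : Prop := out = calcMaxProbWin_alt wins
instance (wins : List String) (out : Option String) : Decidable (Spec_calcMaxProbWin wins out) := by unfold Spec_calcMaxProbWin; infer_instance

-- ===== CLAIM (what is proved, stated in full; the proofs are below) =====
def Claim_equal_calcMaxProbWin : Prop := ∀ (wins : List String), Dom_calcMaxProbWin wins → Spec_calcMaxProbWin wins (calcMaxProbWin wins)

-- ===== LEMMAS AND PROOFS =====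

-- the Boyer-Moore step function of port B
def bmStep (s : String × Int) (x : String) : String × Int :=
  if s.2 = 0 then (x, 1) else if x = s.1 then (s.1, s.2 + 1) else (s.1, s.2 - 1)

-- Boyer-Moore invariant: the counter stays nonnegative, and every value's occurrence count
-- is bounded by (len + cnt)/2 for the candidate and (len - cnt)/2 for everything else.
lemma bm_inv (l : List String) :
    0 ≤ (l.foldl bmStep ("", 0)).2 ∧
    ∀ x : String, 2 * (l.count x : Int) ≤ l.length +
      (if x = (l.foldl bmStep ("", 0)).1 then (l.foldl bmStep ("", 0)).2
       else -(l.foldl bmStep ("", 0)).2) := by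
  induction l using List.reverseRecOn with
  | nil => simp
  | append_singleton l a ih =>
    rw [List.foldl_append, List.foldl_cons, List.foldl_nil]
    obtain ⟨hc, hb⟩ := ih
    have hcnt : ∀ x : String, ((l ++ [a]).count x : Int) =
        (l.count x : Int) + (if x = a then 1 else 0) := by
      intro x
      by_cases hxa : x = a
      · simp [List.count_append, hxa]
      · simp [List.count_append, hxa,
          List.count_eq_zero.mpr (by simp [hxa] : x ∉ [a])]
    have hlen : ((l ++ [a]).length : Int) = (l.length : Int) + 1 := by simp
    set P := l.foldl bmStep ("", 0) with hP
    obtain ⟨cand, cnt⟩ := P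
    simp only at hc hb ⊢
    unfold bmStep
    by_cases h0 : cnt = 0
    · simp only [h0]
      refine ⟨by norm_num, fun x => ?_⟩
      have hx := hb x
      have hx' : 2 * (l.count x : Int) ≤ l.length := by
        split_ifs at hx <;> omega
      rw [hcnt x, hlen]
      by_cases hxa : x = a
      · subst hxa; simp; omega
      · simp [hxa]; omega
    · simp only [if_neg h0]
      by_cases hac : a = cand
      · subst hac
        rw [if_pos rfl]
        refine ⟨by omega, fun x => ?_⟩
        have hx := hb x
        rw [hcnt x, hlen]
        by_cases hxa : x = a
        · subst hxa; simp at hx ⊢; omega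
        · simp [hxa] at hx ⊢; omega
      · simp only [if_neg hac]
        refine ⟨by omega, fun x => ?_⟩
        have hx := hb x
        rw [hcnt x, hlen]
        by_cases hxc : x = cand
        · subst hxc
          have hxa : ¬ x = a := fun h => hac h.symm
          simp at hx
          simp [hxa]; omega
        · by_cases hxa : x = a
          · subst hxa
            simp [hxc] at hx
            simp [hxc]; omega
          · simp [hxc, hxa] at hx ⊢; omega

-- any strict majority element is the Boyer-Moore candidate
lemma bm_candidate (l : List String) (x : String)
    (hx : (l.length : Int) < 2 * (l.count x : Int)) :
    x = (l.foldl bmStep ("", 0)).1 := by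
  obtain ⟨hc, hb⟩ := bm_inv l
  have := hb x
  by_contra hne
  rw [if_neg hne] at this
  omega

-- the argmax fold of port A: the accumulator's score never decreases
lemma argmax_ub (c : String → ℚ) (ks : List String) :
    ∀ s : ℚ × Option String,
      s.1 ≤ (ks.foldl (fun s k => if c k > s.1 then (c k, some k) else s) s).1 := by
  induction ks with
  | nil => intro s; simp
  | cons a t ih =>
    intro s
    simp only [List.foldl_cons]
    refine le_trans ?_ (ih _)
    split_ifs with h
    · exact le_of_lt h
    · exact le_rfl

-- every scanned key's score is bounded by the final score
lemma argmax_mem_le (c : String → ℚ) (ks : List String) :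
    ∀ (s : ℚ × Option String), ∀ k ∈ ks,
      c k ≤ (ks.foldl (fun s k => if c k > s.1 then (c k, some k) else s) s).1 := by
  induction ks with
  | nil => intro s k hk; simp at hk
  | cons a t ih =>
    intro s k hk
    simp only [List.foldl_cons]
    rcases List.mem_cons.mp hk with rfl | hk
    · refine le_trans ?_ (argmax_ub c t _)
      by_cases h : c k > s.1
      · rw [if_pos h]
      · rw [if_neg h]; exact not_lt.mp h
    · exact ih _ k hk

-- the final state is either the initial one or (c k, some k) for a scanned key k
lemma argmax_attain (c : String → ℚ) (ks : List String) :
    ∀ s : ℚ × Option String,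
      (ks.foldl (fun s k => if c k > s.1 then (c k, some k) else s) s) = s ∨
      ∃ k ∈ ks, (ks.foldl (fun s k => if c k > s.1 then (c k, some k) else s) s) = (c k, some k) := by
  induction ks with
  | nil => intro s; left; simp
  | cons a t ih =>
    intro s
    simp only [List.foldl_cons]
    by_cases h : c a > s.1
    · rw [if_pos h]
      rcases ih (c a, some a) with h' | ⟨k, hk, h'⟩
      · right; exact ⟨a, List.mem_cons_self, h'⟩
      · right; exact ⟨k, List.mem_cons_of_mem _ hk, h'⟩
    · rw [if_neg h]
      rcases ih s with h' | ⟨k, hk, h'⟩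
      · left; exact h'
      · right; exact ⟨k, List.mem_cons_of_mem _ hk, h'⟩

-- A's counting loop (setdefault then += 1) builds exactly Counter(wins)
-- one counting step of A (setdefault item 0; d[item] += 1) equals Counter's modify step
lemma step_eq_modify (d : PySem.Dict String Int) (a : String) :
    (d.setdefault a 0).insert a ((d.setdefault a 0).getD a 0 + 1) = d.modify a 0 (· + 1) := by
  obtain ⟨items⟩ := d
  apply PySem.Dict.ext
  simp only [PySem.Dict.setdefault, PySem.Dict.insert, PySem.Dict.modify, PySem.Dict.getD,
    PySem.Dict.get?, PySem.Dict.contains]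
  by_cases h : (items.any fun p => p.1 == a) = true
  · simp [h]
  · simp only [h, Bool.false_eq_true, if_false]
    simp only [Bool.not_eq_true] at h
    have hnone : items.find? (fun p => p.1 == a) = none := by
      rw [List.find?_eq_none]
      intro p hp
      have := List.any_eq_false.mp h p hp
      simpa using this
    have hmap : ∀ (v : String × Int), items.map (fun p => if p.1 = a then v else p) = items := by
      intro v
      induction items with
      | nil => rfl
      | cons p t iht =>
        simp only [List.any_cons, Bool.or_eq_false_iff] at h
        have hp1 : ¬ p.1 = a := by simpa using h.1
        have := iht h.2 (by
          rw [List.find?_eq_none] at hnone ⊢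
          intro q hq; exact hnone q (List.mem_cons_of_mem _ hq))
        simp [hp1, this]
    simp [hnone, hmap]

lemma a_dict_eq_counter (wins : List String) :
    wins.foldl (fun d item =>
      let d1 := d.setdefault item 0
      d1.insert item (d1.getD item 0 + 1)) (PySem.Dict.empty : PySem.Dict String Int) =
    PySem.Dict.counter wins := by
  rw [PySem.Dict.counter_eq_foldl]
  have hstep : (fun (d : PySem.Dict String Int) item =>
      let d1 := d.setdefault item 0
      d1.insert item (d1.getD item 0 + 1)) =
      fun (d : PySem.Dict String Int) x => d.modify x 0 (· + 1) :=
    funext fun d => funext fun a => step_eq_modify d a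
  rw [hstep]

-- ratio test over ℚ = integer test, for a positive length
lemma ratio_iff (c : Nat) (n : Nat) (hn : 0 < n) :
    ((9 : ℚ) / 10 ≤ ((c : Int) : ℚ) / ((n : Int) : ℚ)) ↔ (9 * (n : Int) ≤ 10 * (c : Int)) := by
  rw [div_le_div_iff₀ (by norm_num) (by push_cast; exact_mod_cast hn)]
  constructor <;> intro h
  · have h' : (9 : Int) * n ≤ c * 10 := by exact_mod_cast h
    omega
  · have h' : (9 : Int) * n ≤ c * 10 := by omega
    exact_mod_cast h'

-- ===== VERDICT (by name: the statement is the Claim_ definition above) =====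
theorem calcMaxProbWin_spec : Claim_equal_calcMaxProbWin := by
  intro wins _
  unfold Spec_calcMaxProbWin calcMaxProbWin calcMaxProbWin_alt
  rw [a_dict_eq_counter]
  simp only [PySem.Dict.getD_counter, PySem.Dict.keys_counter]
  rcases wins with _ | ⟨w, rest⟩
  · norm_num [PySem.Set.ofList]
  set wins := w :: rest with hw
  have hne : wins ≠ [] := by simp [hw]
  have hlen : 0 < wins.length := by simp [hw]
  rw [if_neg (by simp [hw] : wins.isEmpty ≠ true)]
  -- name the two folds
  set c : String → ℚ := fun k => ((wins.count k : Int) : ℚ) / ((wins.length : Int) : ℚ) with hcdef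
  have hfold : ∀ s : ℚ × Option String,
      ((PySem.Set.ofList wins).foldl (fun s k =>
        if ((wins.count k : Int) : ℚ) / ((wins.length : Int) : ℚ) > s.1 then
          (((wins.count k : Int) : ℚ) / ((wins.length : Int) : ℚ), some k) else s) s) =
      ((PySem.Set.ofList wins).foldl (fun s k => if c k > s.1 then (c k, some k) else s) s) := by
    intro s; rfl
  rw [hfold]
  set r := ((PySem.Set.ofList wins).foldl (fun s k => if c k > s.1 then (c k, some k) else s)
      ((0 : ℚ), (none : Option String))) with hr
  set cand := (wins.foldl (fun (s : String × Int) x =>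
      if s.2 = 0 then (x, 1) else if x = s.1 then (s.1, s.2 + 1) else (s.1, s.2 - 1)) ("", 0)).1
    with hcand
  have hcand' : cand = (wins.foldl bmStep ("", 0)).1 := by rfl
  by_cases hmaj : ∃ k ∈ wins, 9 * (wins.length : Int) ≤ 10 * (wins.count k : Int)
  · obtain ⟨k, hkmem, hk9⟩ := hmaj
    -- k is a strict majority, hence the BM candidate
    have hkmaj : (wins.length : Int) < 2 * (wins.count k : Int) := by omega
    have hkcand : k = cand := by rw [hcand']; exact bm_candidate wins k hkmaj
    -- A's side: the max score is ≥ 9/10, attained at some j with 10*count j ≥ 9*len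
    have hck : (9 : ℚ) / 10 ≤ c k := (ratio_iff _ _ hlen).mpr hk9
    have hkeys : k ∈ PySem.Set.ofList wins := (PySem.Set.mem_ofList wins k).mpr hkmem
    have hub : c k ≤ r.1 := argmax_mem_le c _ _ k hkeys
    have hge : (9 : ℚ) / 10 ≤ r.1 := le_trans hck hub
    rw [if_pos hge]
    rcases argmax_attain c (PySem.Set.ofList wins) ((0 : ℚ), (none : Option String)) with h0 | ⟨j, hjmem, hj⟩
    · exfalso; rw [← hr] at h0; rw [h0] at hge; norm_num at hge
    · rw [← hr] at hj
      have hj1 : r.1 = c j := by rw [hj]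
      have hj9 : 9 * (wins.length : Int) ≤ 10 * (wins.count j : Int) := by
        refine (ratio_iff _ _ hlen).mp ?_
        show (9 : ℚ) / 10 ≤ c j
        rw [← hj1]; exact hge
      have hjmaj : (wins.length : Int) < 2 * (wins.count j : Int) := by omega
      have hjcand : j = cand := by rw [hcand']; exact bm_candidate wins j hjmaj
      rw [hj, if_pos (by rw [← hjcand]; exact hj9)]
      simp [hjcand]
  · push Not at hmaj
    -- B's side: the candidate fails the threshold
    have hbfail : ¬ (9 * (wins.length : Int) ≤ 10 * (wins.count cand : Int)) := by
      by_cases hc : cand ∈ wins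
      · exact not_le.mpr (hmaj cand hc)
      · have : wins.count cand = 0 := List.count_eq_zero.mpr hc
        rw [this]; omega
    -- A's side: the max score is below 9/10
    have hAnone : (if r.1 ≥ (9 : ℚ) / 10 then r.2 else none) = none := by
      rcases argmax_attain c (PySem.Set.ofList wins) ((0 : ℚ), (none : Option String)) with h0 | ⟨j, hjmem, hj⟩
      · rw [← hr] at h0; rw [h0]; norm_num
      · rw [← hr] at hj
        have hjw : j ∈ wins := (PySem.Set.mem_ofList wins j).mp hjmem
        have hjlt : ¬ ((9 : ℚ) / 10 ≤ c j) := by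
          rw [hcdef]
          rw [ratio_iff _ _ hlen]
          exact not_le.mpr (hmaj j hjw)
        rw [hj, if_neg (by simpa using hjlt)]
    rw [hAnone, if_neg (by rw [ge_iff_le]; exact hbfail)]
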